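-- pv_equiv track=rewrite | github.com/Chung-I/tsm | tsm/util.py | phrase_boundary_to_start_and_ends
-- ===== SOURCE A (Python) =====
-- from typing import List, Dict, Tuple, Iterable, Union
--
-- def phrase_boundary_to_start_and_ends(boundaries: List[bool]) -> List[Tuple[int, int]]:
--     """
--         [False, False, True, False, True] -> [(0, 3), (3, 5)]
--     """
--     start = 0
--     start_and_ends = []
--     for idx in range(len(boundaries)):
--         if boundaries[idx]:
--             start_and_ends.append((start, idx+1))
--             start = idx+1
--     return start_and_ends
-- ===== SOURCE B (Python) =====
-- def phrase_boundary_to_start_and_ends(boundaries):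
--     ends = [i + 1 for i, b in enumerate(boundaries) if b]
--     starts = [0] + ends[:-1]
--     return list(zip(starts, ends))
-- ===== Notes on version B (the rewrite author's own statement) =====
-- stated objective: idiomatic
-- what changed: Replaces the stateful loop carrying a running 'start' with building the list of end indices in one pass and pairing it with its own shifted copy ([0]+ends[:-1]) via zip.
import Mathlib
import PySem

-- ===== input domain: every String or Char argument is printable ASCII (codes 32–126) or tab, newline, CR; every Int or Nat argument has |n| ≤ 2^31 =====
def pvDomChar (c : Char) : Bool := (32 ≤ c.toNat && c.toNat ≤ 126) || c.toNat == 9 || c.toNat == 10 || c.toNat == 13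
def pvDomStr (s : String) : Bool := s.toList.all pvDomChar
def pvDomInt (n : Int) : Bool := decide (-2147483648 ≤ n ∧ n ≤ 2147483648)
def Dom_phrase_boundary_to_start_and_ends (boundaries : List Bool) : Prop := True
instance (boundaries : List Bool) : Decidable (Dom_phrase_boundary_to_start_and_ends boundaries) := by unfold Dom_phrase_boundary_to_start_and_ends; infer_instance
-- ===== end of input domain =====

-- B builds the list of end indices in one pass and zips it with its shifted copy, replacing A's stateful running-start loop (idiomatic decomposition; same cost).


-- ===== PORT A =====
-- literal port: for idx in range(len(boundaries)): if boundaries[idx]: append (start, idx+1); start = idx+1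
-- (boundaries[idx] ported as pyGetD with default false: every idx drawn from range(len(boundaries)) is in range, so the default is never used)
def phrase_boundary_to_start_and_ends (boundaries : List Bool) : List (Int × Int) :=
  ((PySem.List.pyRange 0 (PySem.List.len boundaries) 1).foldl
    (fun (st : Int × List (Int × Int)) idx =>
      if PySem.List.pyGetD boundaries idx false then (idx + 1, st.2 ++ [(st.1, idx + 1)]) else st)
    (0, [])).2

-- ===== PORT B =====
-- ends = [i + 1 for i, b in enumerate(boundaries) if b]
def pvEnds (boundaries : List Bool) : List Int :=
  (PySem.List.enumerate boundaries).filterMap (fun ib => if ib.2 then some (ib.1 + 1) else none)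

-- starts = [0] + ends[:-1]; return list(zip(starts, ends))
def phrase_boundary_to_start_and_ends_alt (boundaries : List Bool) : List (Int × Int) :=
  let ends := pvEnds boundaries
  let starts := 0 :: ends.dropLast
  starts.zip ends

-- ===== PRECONDITION & SPEC =====
def Spec_phrase_boundary_to_start_and_ends (boundaries : List Bool) (out : List (Int × Int)) : Prop := out = phrase_boundary_to_start_and_ends_alt boundaries
instance (boundaries : List Bool) (out : List (Int × Int)) : Decidable (Spec_phrase_boundary_to_start_and_ends boundaries out) := by unfold Spec_phrase_boundary_to_start_and_ends; infer_instance

-- ===== CLAIM (what is proved, stated in full; the proofs are below) =====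
def Claim_equal_phrase_boundary_to_start_and_ends : Prop := ∀ (boundaries : List Bool), Dom_phrase_boundary_to_start_and_ends boundaries → Spec_phrase_boundary_to_start_and_ends boundaries (phrase_boundary_to_start_and_ends boundaries)

-- ===== LEMMAS AND PROOFS =====

-- zipping a list against itself shifted by one, after appending a new last element
theorem pv_zip_shift (E : List Int) (z a : Int) :
    (z :: E).zip (E ++ [a]) = (z :: E.dropLast).zip E ++ [(E.getLastD z, a)] := by
  induction E generalizing z with
  | nil => simp
  | cons e es ih =>
    have h := ih (z := e)
    cases es with
    | nil => simp [List.zip]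
    | cons f fs =>
      simp only [List.cons_append, List.zip_cons_cons, List.dropLast_cons₂,
        List.getLastD_cons] at h ⊢
      rw [h]

theorem pvEnds_append_singleton (bs : List Bool) (x : Bool) :
    pvEnds (bs ++ [x]) = pvEnds bs ++ (if x then [(bs.length : Int) + 1] else []) := by
  simp only [pvEnds, PySem.List.enumerate_append, List.filterMap_append,
    PySem.List.enumerate_cons, PySem.List.enumerate_nil, List.filterMap_cons,
    List.filterMap_nil]
  cases x <;> simp

-- invariant of A's fold: the running start is the last end so far, the accumulator is B's zip
theorem pv_fold_invariant (bs : List Bool) :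
    ((PySem.List.pyRange 0 (PySem.List.len bs) 1).foldl
      (fun (st : Int × List (Int × Int)) idx =>
        if PySem.List.pyGetD bs idx false then (idx + 1, st.2 ++ [(st.1, idx + 1)]) else st)
      (0, []))
    = ((pvEnds bs).getLastD 0, (0 :: (pvEnds bs).dropLast).zip (pvEnds bs)) := by
  induction bs using List.reverseRecOn with
  | nil => simp [PySem.List.pyRange, pvEnds, PySem.List.enumerate_nil, PySem.List.len]
  | append_singleton bs x ih =>
    have hlen : PySem.List.len (bs ++ [x]) = PySem.List.len bs + 1 := by simp
    rw [hlen, PySem.List.pyRange_one_succ_right (by simp), List.foldl_append]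
    have hcongr :
        (PySem.List.pyRange 0 (PySem.List.len bs) 1).foldl
          (fun (st : Int × List (Int × Int)) idx =>
            if PySem.List.pyGetD (bs ++ [x]) idx false then (idx + 1, st.2 ++ [(st.1, idx + 1)]) else st)
          (0, [])
        = (PySem.List.pyRange 0 (PySem.List.len bs) 1).foldl
          (fun (st : Int × List (Int × Int)) idx =>
            if PySem.List.pyGetD bs idx false then (idx + 1, st.2 ++ [(st.1, idx + 1)]) else st)
          (0, []) := by
      apply PySem.List.foldl_congr_mem
      intro acc i hi
      rw [PySem.List.mem_pyRange_one] at hi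
      have hlt : i.toNat < bs.length := by
        have h2 := hi.2; simp at h2; omega
      have hcast : i = (i.toNat : Int) := by omega
      rw [hcast, PySem.List.pyGetD_natCast, PySem.List.pyGetD_natCast,
        List.getD_append _ _ _ _ hlt]
    rw [hcongr, ih]
    have hget : PySem.List.pyGetD (bs ++ [x]) ((bs.length : Nat) : Int) false = x := by
      rw [PySem.List.pyGetD_natCast]
      simp [List.getD]
    simp only [List.foldl_cons, List.foldl_nil, PySem.List.len_eq]
    rw [hget]
    rw [pvEnds_append_singleton]
    cases x with
    | false => simp
    | true =>
      simp only [if_true]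
      have hzip := pv_zip_shift (pvEnds bs) 0 ((bs.length : Int) + 1)
      refine Prod.ext ?_ ?_
      · simp
      · show (0 :: (pvEnds bs).dropLast).zip (pvEnds bs) ++ [((pvEnds bs).getLastD 0, (bs.length : Int) + 1)]
            = (0 :: (pvEnds bs ++ [(bs.length : Int) + 1]).dropLast).zip (pvEnds bs ++ [(bs.length : Int) + 1])
        rw [show (pvEnds bs ++ [(bs.length : Int) + 1]).dropLast = pvEnds bs by simp, hzip]

-- ===== VERDICT (by name: the statement is the Claim_ definition above) =====
theorem phrase_boundary_to_start_and_ends_spec : Claim_equal_phrase_boundary_to_start_and_ends := by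
  intro bs _
  unfold Spec_phrase_boundary_to_start_and_ends
  unfold phrase_boundary_to_start_and_ends phrase_boundary_to_start_and_ends_alt
  rw [pv_fold_invariant]
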